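-- pv_equiv track=rewrite | github.com/EPFL-LAP/dynamatic | ftdscripting/addOpaqueBuffers.py | look_for_ssa
-- ===== SOURCE A (Python) =====
-- def look_for_ssa(lines, ssa_name):
--     found_ssa_name = 0
--     for line in lines:
--         if ssa_name in line:
--             found_ssa_name = 1
--         if f'handshake.name = "{ssa_name}' in line:
--             found_ssa_name = 2
--     return found_ssa_name
-- ===== SOURCE B (Python) =====
-- def look_for_ssa(lines, ssa_name):
--     # The handshake pattern contains ssa_name, so on any line the later test
--     # dominates: the answer is decided by the LAST line containing ssa_name.
--     pattern = f'handshake.name = "{ssa_name}'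
--     for line in reversed(lines):
--         if ssa_name in line:
--             return 2 if pattern in line else 1
--     return 0
-- ===== Notes on version B (the rewrite author's own statement) =====
-- stated objective: faster
-- what changed: B scans the lines in reverse and returns at the first line containing ssa_name (2 if it carries the handshake pattern, else 1), replacing A's forward full scan with an overwriting accumulator; B also builds the pattern string once instead of per line.
import Mathlib
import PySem

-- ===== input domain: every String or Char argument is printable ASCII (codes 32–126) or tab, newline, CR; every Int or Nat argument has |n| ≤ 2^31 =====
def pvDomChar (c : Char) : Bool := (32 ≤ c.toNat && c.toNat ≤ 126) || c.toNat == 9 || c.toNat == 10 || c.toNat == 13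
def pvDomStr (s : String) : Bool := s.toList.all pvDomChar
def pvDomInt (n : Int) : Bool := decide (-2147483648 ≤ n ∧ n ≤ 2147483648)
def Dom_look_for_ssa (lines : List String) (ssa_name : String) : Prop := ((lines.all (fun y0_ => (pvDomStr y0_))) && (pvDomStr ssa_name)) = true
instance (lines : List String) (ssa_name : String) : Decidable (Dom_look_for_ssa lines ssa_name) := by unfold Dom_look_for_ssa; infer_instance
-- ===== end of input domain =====

-- B replaces A's forward full scan with an overwriting accumulator by a reverse scan
-- with early exit at the first (i.e. last) line containing ssa_name (alternative decomposition).

-- ===== PORT A =====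
def look_for_ssa (lines : List String) (ssa_name : String) : Int :=
  lines.foldl (fun found_ssa_name line =>
    let found_ssa_name := if PySem.Str.isIn ssa_name line then 1 else found_ssa_name
    if PySem.Str.isIn ("handshake.name = \"" ++ ssa_name) line then 2 else found_ssa_name) 0

-- ===== PORT B =====
def lookForSsaAltGo (ssa_name pattern : String) : List String → Int
  | [] => 0
  | line :: rest =>
      if PySem.Str.isIn ssa_name line then
        (if PySem.Str.isIn pattern line then 2 else 1)
      else lookForSsaAltGo ssa_name pattern rest

def look_for_ssa_alt (lines : List String) (ssa_name : String) : Int :=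
  lookForSsaAltGo ssa_name ("handshake.name = \"" ++ ssa_name) lines.reverse

-- ===== PRECONDITION & SPEC =====
def Spec_look_for_ssa (lines : List String) (ssa_name : String) (out : Int) : Prop := out = look_for_ssa_alt lines ssa_name
instance (lines : List String) (ssa_name : String) (out : Int) : Decidable (Spec_look_for_ssa lines ssa_name out) := by unfold Spec_look_for_ssa; infer_instance

-- ===== CLAIM (what is proved, stated in full; the proofs are below) =====
def Claim_equal_look_for_ssa : Prop := ∀ (lines : List String) (ssa_name : String), Dom_look_for_ssa lines ssa_name → Spec_look_for_ssa lines ssa_name (look_for_ssa lines ssa_name)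

-- ===== LEMMAS AND PROOFS =====

-- the handshake pattern contains ssa_name, so a line containing the pattern contains ssa_name
theorem isIn_of_isIn_pattern (s line : String)
    (h : PySem.Str.isIn ("handshake.name = \"" ++ s) line = true) :
    PySem.Str.isIn s line = true := by
  rw [PySem.Str.isIn_iff_infix] at h ⊢
  have hsub : s.toList <:+: ("handshake.name = \"" ++ s).toList := by
    rw [String.toList_append]
    exact (List.suffix_append _ _).isInfix
  exact hsub.trans h

theorem look_for_ssa_eq_go (s : String) (lines : List String) :
    look_for_ssa lines s = lookForSsaAltGo s ("handshake.name = \"" ++ s) lines.reverse := by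
  induction lines using List.reverseRecOn with
  | nil => rfl
  | append_singleton xs l ih =>
      unfold look_for_ssa at ih ⊢
      rw [List.foldl_append, List.reverse_append, List.foldl_cons, List.foldl_nil]
      simp only [List.reverse_singleton, List.singleton_append, lookForSsaAltGo]
      show (if PySem.Str.isIn ("handshake.name = \"" ++ s) l = true then 2
              else if PySem.Str.isIn s l = true then 1 else look_for_ssa xs s) =
           (if PySem.Str.isIn s l = true then
              (if PySem.Str.isIn ("handshake.name = \"" ++ s) l = true then 2 else 1)
            else lookForSsaAltGo s ("handshake.name = \"" ++ s) xs.reverse)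
      by_cases hp : PySem.Str.isIn ("handshake.name = \"" ++ s) l = true
      · rw [if_pos hp, if_pos (isIn_of_isIn_pattern s l hp), if_pos hp]
      · rw [if_neg hp]
        by_cases hs : PySem.Str.isIn s l = true
        · rw [if_pos hs, if_pos hs, if_neg hp]
        · rw [if_neg hs, if_neg hs]
          exact ih

-- ===== VERDICT (by name: the statement is the Claim_ definition above) =====
theorem look_for_ssa_spec : Claim_equal_look_for_ssa := by
  intro lines ssa_name _
  unfold Spec_look_for_ssa look_for_ssa_alt
  exact look_for_ssa_eq_go ssa_name lines
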